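-- pv_equiv track=rewrite | github.com/sunhaoyu-1990/XB_Production_V1.004 | Data_Basic_Function.py | get_max_times_of_elements
-- ===== SOURCE A (Python) =====
-- def get_max_times_of_elements(lists, length):
--     """
--     计算所给数组中所有元素（或者元素的部分内容）在数组出现的最多次数
--     :param lists: 输入的数组
--     :param length: 元素参与对比的部分长度
--     :return: 返回最大长度和最大长度门架中最后一个的下标
--     """
--     max_value = 0  # 用于记录数组中元素出现的最大次数
--     last_index = 0  # 用于记录最高重复的门架中最后的一个的下标
--     ele_times = {}  # 用于记录每个元素和其在数组中的出现次数，不返回，可在后续进行拓展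
--     # 循环遍历所有输入数组的元素
--     for i, ele in enumerate(lists):
--         try:
--             ele_times[ele[:length]] += 1  # 每个元素出现，就在其对应的value加上1
--         except:
--             ele_times[ele[:length]] = 1  # 如果出现的元素为第一次，则给该元素的值赋值1
--         if max_value <= ele_times[ele[:length]]:  # 如果该元素的出现次数大院max_value，就将该值赋给max_value
--             max_value = ele_times[ele[:length]]
--             last_index = i
--     return max_value, last_index
-- ===== SOURCE B (Python) =====
-- def get_max_times_of_elements(lists, length):
--     """Two-pass re-implementation: build the full frequency table first,
--     take its max, then scan once for the last index whose key attains it."""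
--     keys = [ele[:length] for ele in lists]
--     counts = {}
--     for k in keys:
--         counts[k] = counts.get(k, 0) + 1
--     max_value = max(counts.values(), default=0)
--     last_index = 0
--     for i, k in enumerate(keys):
--         if counts[k] == max_value:
--             last_index = i
--     return max_value, last_index
-- ===== Notes on version B (the rewrite author's own statement) =====
-- stated objective: alternative
-- what changed: A fuses counting, the running maximum and the last index into one online loop over an evolving dict; B separates the phases: build the full frequency table first, take the max of its values, then scan once for the last index whose key attains that max.
import Mathlib
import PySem

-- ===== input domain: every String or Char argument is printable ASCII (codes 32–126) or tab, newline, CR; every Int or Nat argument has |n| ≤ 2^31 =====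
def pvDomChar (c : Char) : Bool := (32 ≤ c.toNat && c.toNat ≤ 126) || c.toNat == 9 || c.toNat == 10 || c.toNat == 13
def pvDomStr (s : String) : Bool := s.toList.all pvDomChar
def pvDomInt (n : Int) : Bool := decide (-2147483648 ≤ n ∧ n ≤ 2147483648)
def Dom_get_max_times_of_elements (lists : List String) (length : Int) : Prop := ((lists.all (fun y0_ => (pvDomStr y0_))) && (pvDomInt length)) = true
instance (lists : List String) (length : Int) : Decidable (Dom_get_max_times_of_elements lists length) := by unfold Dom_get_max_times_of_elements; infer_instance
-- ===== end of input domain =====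

-- B replaces A's fused single-pass loop (running max + running last index + evolving dict) by a
-- two-pass table-then-scan: build the full frequency table, take its max, then scan for the last
-- index attaining it; same return value on every input (objective: alternative decomposition).

-- ===== PORT A =====
-- ele[:length]
def pvKey (length : Int) (ele : String) : String := PySem.Str.slice ele none (some length)

-- A's loop body: try d[k] += 1 / except: d[k] = 1; then if max_value <= d[k]: update.
def pvStepA (st : Int × Int × PySem.Dict String Int) (p : Int × String) :
    Int × Int × PySem.Dict String Int :=
  let d' := if st.2.2.contains p.2 then st.2.2.insert p.2 (st.2.2.getD p.2 0 + 1)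
            else st.2.2.insert p.2 1
  let c := d'.getD p.2 0
  if st.1 ≤ c then (c, p.1, d') else (st.1, st.2.1, d')

def get_max_times_of_elements (lists : List String) (length : Int) : Int × Int :=
  let r := (PySem.List.enumerate lists 0).foldl
    (fun st p => pvStepA st (p.1, pvKey length p.2)) (0, 0, PySem.Dict.empty)
  (r.1, r.2.1)

-- ===== PORT B =====
def get_max_times_of_elements_alt (lists : List String) (length : Int) : Int × Int :=
  let keys := lists.map (fun ele => pvKey length ele)
  let counts := keys.foldl (fun d k => d.insert k (d.getD k 0 + 1))
      (PySem.Dict.empty : PySem.Dict String Int)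
  let max_value := (PySem.List.max? counts.values (fun v => v)).getD 0
  let last_index := (PySem.List.enumerate keys 0).foldl
      (fun li p => if counts.getD p.2 0 = max_value then p.1 else li) 0
  (max_value, last_index)

-- ===== PRECONDITION & SPEC =====
def Spec_get_max_times_of_elements (lists : List String) (length : Int) (out : Int × Int) : Prop := out = get_max_times_of_elements_alt lists length
instance (lists : List String) (length : Int) (out : Int × Int) : Decidable (Spec_get_max_times_of_elements lists length out) := by unfold Spec_get_max_times_of_elements; infer_instance

-- ===== CLAIM (what is proved, stated in full; the proofs are below) =====
def Claim_equal_get_max_times_of_elements : Prop := ∀ (lists : List String) (length : Int), Dom_get_max_times_of_elements lists length → Spec_get_max_times_of_elements lists length (get_max_times_of_elements lists length)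

-- ===== LEMMAS AND PROOFS =====

-- the maximal multiplicity in ks (0 for [])
def pvM (ks : List String) : Int := (ks.map (fun k => (ks.count k : Int))).foldr max 0

-- the last index whose key attains the maximal multiplicity (0 for [])
def pvL (ks : List String) : Int :=
  (PySem.List.enumerate ks 0).foldl
    (fun li p => if (ks.count p.2 : Int) = pvM ks then p.1 else li) 0

lemma pv_foldr_max_nonneg (l : List Int) : 0 ≤ l.foldr max 0 := by
  induction l with
  | nil => simp
  | cons a t ih => simpa using Or.inr ih

lemma pv_le_foldr_max (l : List Int) {a : Int} (h : a ∈ l) : a ≤ l.foldr max 0 := by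
  induction l with
  | nil => simp at h
  | cons b t ih =>
    rcases List.mem_cons.mp h with rfl | h
    · simp
    · simpa using Or.inr (ih h)

lemma pv_foldr_max_le (l : List Int) {c : Int} (h0 : 0 ≤ c) (h : ∀ a ∈ l, a ≤ c) :
    l.foldr max 0 ≤ c := by
  induction l with
  | nil => simpa using h0
  | cons a t ih =>
    simp only [List.foldr_cons, max_le_iff]
    exact ⟨h a (by simp), ih (fun b hb => h b (by simp [hb]))⟩

lemma pv_foldr_max_mem (l : List Int) : l.foldr max 0 = 0 ∨ l.foldr max 0 ∈ l := by
  induction l with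
  | nil => simp
  | cons a t ih =>
    simp only [List.foldr_cons]
    rcases le_total a (t.foldr max 0) with h | h
    · rw [max_eq_right h]
      rcases ih with h0 | hm
      · exact Or.inl h0
      · exact Or.inr (List.mem_cons_of_mem _ hm)
    · rw [max_eq_left h]
      exact Or.inr (List.mem_cons_self)

lemma pvM_nonneg (ks : List String) : 0 ≤ pvM ks := pv_foldr_max_nonneg _

lemma pvM_le (ks : List String) {x : String} (h : x ∈ ks) : (ks.count x : Int) ≤ pvM ks :=
  pv_le_foldr_max _ (List.mem_map_of_mem h)

lemma pvM_exists (ks : List String) (h : ks ≠ []) :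
    ∃ x ∈ ks, (ks.count x : Int) = pvM ks := by
  rcases pv_foldr_max_mem (ks.map (fun k => (ks.count k : Int))) with h0 | hm
  · rcases ks with _ | ⟨a, t⟩
    · exact absurd rfl h
    · exfalso
      have h1 : ((a :: t).count a : Int) ≤ pvM (a :: t) := pvM_le _ (by simp)
      have h2 : 0 < (a :: t).count a := List.count_pos_iff.mpr (by simp)
      have : pvM (a :: t) = 0 := h0
      omega
  · rcases List.mem_map.mp hm with ⟨x, hx, hx2⟩
    exact ⟨x, hx, hx2⟩

lemma pv_count_snoc (ks : List String) (k x : String) :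
    (ks ++ [k]).count x = ks.count x + (if x = k then 1 else 0) := by
  by_cases h : x = k
  · subst h; simp
  · simp [List.count_append, h, Ne.symm h]

lemma pvM_snoc (ks : List String) (k : String) :
    pvM (ks ++ [k]) = max (pvM ks) ((ks.count k : Int) + 1) := by
  apply le_antisymm
  · apply pv_foldr_max_le
    · exact le_max_of_le_right (by positivity)
    · intro a ha
      rcases List.mem_map.mp ha with ⟨x, hx, rfl⟩
      rw [pv_count_snoc]
      by_cases hxk : x = k
      · subst hxk; simp
      · have hx' : x ∈ ks := by
          rcases List.mem_append.mp hx with h | h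
          · exact h
          · simp at h; exact absurd h hxk
        simp only [hxk, if_false]
        exact le_max_of_le_left (pvM_le ks hx')
  · rw [max_le_iff]
    constructor
    · rcases eq_or_ne ks [] with rfl | hne
      · exact le_trans (le_of_eq rfl) (pvM_nonneg ([] ++ [k]))
      · rcases pvM_exists ks hne with ⟨x, hx, hx2⟩
        calc pvM ks = (ks.count x : Int) := hx2.symm
          _ ≤ ((ks ++ [k]).count x : Int) := by rw [pv_count_snoc]; split <;> omega
          _ ≤ pvM (ks ++ [k]) := pvM_le _ (List.mem_append_left _ hx)
    · have : ((ks ++ [k]).count k : Int) = (ks.count k : Int) + 1 := by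
        rw [pv_count_snoc]; simp
      rw [← this]
      exact pvM_le _ (List.mem_append_right _ (by simp))

lemma pv_mem_enum_snd {ks : List String} {p : Int × String} (h : p ∈ PySem.List.enumerate ks 0) :
    p.2 ∈ ks := by
  rcases (PySem.List.mem_enumerate_iff _ _ _).mp h with ⟨j, hj, rfl⟩
  exact List.getElem_mem hj

-- the invariant of A's fused loop over a key list
lemma pvA_inv (ks : List String) :
    (PySem.List.enumerate ks 0).foldl pvStepA (0, 0, PySem.Dict.empty)
      = (pvM ks, pvL ks, PySem.Dict.counter ks) := by
  induction ks using List.reverseRecOn with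
  | nil => rfl
  | append_singleton ks k ih =>
    have hEnum : PySem.List.enumerate (ks ++ [k]) 0
        = PySem.List.enumerate ks 0 ++ [((ks.length : Int), k)] := by
      rw [PySem.List.enumerate_append, PySem.List.enumerate_cons, PySem.List.enumerate_nil]
      norm_num
    have hcnt : PySem.Dict.counter (ks ++ [k])
        = (PySem.Dict.counter ks).insert k ((PySem.Dict.counter ks).getD k 0 + 1) := by
      rw [← PySem.Dict.foldl_insert_getD_add_one_eq_counter,
          ← PySem.Dict.foldl_insert_getD_add_one_eq_counter, List.foldl_append]
      rfl
    have hd' : (if (PySem.Dict.counter ks).contains k then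
          (PySem.Dict.counter ks).insert k ((PySem.Dict.counter ks).getD k 0 + 1)
        else (PySem.Dict.counter ks).insert k 1) = PySem.Dict.counter (ks ++ [k]) := by
      rw [hcnt]
      by_cases hc : (PySem.Dict.counter ks).contains k
      · simp [hc]
      · rw [if_neg (by simp [hc]),
           PySem.Dict.getD_of_not_contains _ _ (by simp [hc])]
        norm_num
    have hck : ((ks ++ [k]).count k : Int) = (ks.count k : Int) + 1 := by
      rw [pv_count_snoc]; simp
    have hc' : (PySem.Dict.counter (ks ++ [k])).getD k 0 = (ks.count k : Int) + 1 := by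
      rw [PySem.Dict.getD_counter]; exact hck
    rw [hEnum, List.foldl_append, ih]
    simp only [List.foldl_cons, List.foldl_nil, pvStepA, hd', hc']
    by_cases hle : pvM ks ≤ (ks.count k : Int) + 1
    · rw [if_pos hle]
      have hM : pvM (ks ++ [k]) = (ks.count k : Int) + 1 := by
        rw [pvM_snoc]; exact max_eq_right hle
      have hL : pvL (ks ++ [k]) = (ks.length : Int) := by
        unfold pvL
        rw [hEnum, List.foldl_append]
        simp only [List.foldl_cons, List.foldl_nil]
        rw [if_pos (by rw [hck, hM])]
      rw [hM, hL]
    · rw [if_neg hle]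
      rw [not_le] at hle
      have hM : pvM (ks ++ [k]) = pvM ks := by
        rw [pvM_snoc]; exact max_eq_left (by omega)
      have hL : pvL (ks ++ [k]) = pvL ks := by
        unfold pvL
        rw [hEnum, List.foldl_append]
        simp only [List.foldl_cons, List.foldl_nil]
        rw [if_neg (by rw [hck, hM]; omega)]
        apply PySem.List.foldl_congr_mem
        intro acc p hp
        have hmem := pv_mem_enum_snd hp
        rw [hM]
        by_cases hpk : p.2 = k
        · have h1 : ¬ (((ks ++ [k]).count p.2 : Int) = pvM ks) := by
            rw [hpk, hck]; omega
          have h2 : ¬ ((ks.count p.2 : Int) = pvM ks) := by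
            rw [hpk]
            have : (ks.count k : Int) + 1 ≤ pvM ks := by omega
            omega
          rw [if_neg h1, if_neg h2]
        · have h3 : ((ks ++ [k]).count p.2 : Int) = (ks.count p.2 : Int) := by
            rw [pv_count_snoc, if_neg hpk]; simp
          rw [h3]
      rw [hM, hL]

lemma pv_enum_map {α β : Type} (f : α → β) (xs : List α) (s : Int) :
    PySem.List.enumerate (xs.map f) s = (PySem.List.enumerate xs s).map (fun p => (p.1, f p.2)) := by
  induction xs generalizing s with
  | nil => simp [PySem.List.enumerate_nil]
  | cons x t ih =>
    simp only [List.map_cons, PySem.List.enumerate_cons, ih]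

lemma pv_values_counter (ks : List String) :
    (PySem.Dict.counter ks).values
      = (PySem.Set.ofList ks).map (fun k => (ks.count k : Int)) := by
  show (PySem.Dict.counter ks).items.map (fun p => p.2) = _
  rw [PySem.Dict.items_counter, List.map_map]
  rfl

lemma pvB_max (ks : List String) :
    (PySem.List.max? (PySem.Dict.counter ks).values (fun v => v)).getD 0 = pvM ks := by
  rcases h : PySem.List.max? (PySem.Dict.counter ks).values (fun v => v) with _ | m
  · have hval : (PySem.Dict.counter ks).values = [] := (PySem.List.max?_eq_none_iff _ _).mp h
    rcases hks : ks with _ | ⟨a, t⟩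
    · rfl
    · exfalso
      have ha : a ∈ PySem.Set.ofList ks := by
        rw [PySem.Set.mem_ofList]; rw [hks]; simp
      have : ((ks.count a : Int)) ∈ (PySem.Dict.counter ks).values := by
        rw [pv_values_counter]
        exact List.mem_map_of_mem ha
      rw [hval] at this
      simp at this
  · simp only [Option.getD_some]
    have hm : m ∈ (PySem.Dict.counter ks).values := PySem.List.max?_mem h
    rw [pv_values_counter] at hm
    rcases List.mem_map.mp hm with ⟨x, hx, rfl⟩
    have hx' : x ∈ ks := (PySem.Set.mem_ofList _ _).mp hx
    apply le_antisymm (pvM_le ks hx')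
    have hne : ks ≠ [] := by
      intro hnil
      exact List.not_mem_nil (hnil ▸ hx')
    rcases pvM_exists ks hne with ⟨y, hy, hy2⟩
    have hyv : ((ks.count y : Int)) ∈ (PySem.Dict.counter ks).values := by
      rw [pv_values_counter]
      exact List.mem_map_of_mem ((PySem.Set.mem_ofList _ _).mpr hy)
    calc pvM ks = (ks.count y : Int) := hy2.symm
      _ ≤ (ks.count x : Int) := PySem.List.max?_isMax h _ hyv

lemma pv_main (lists : List String) (length : Int) :
    get_max_times_of_elements lists length = get_max_times_of_elements_alt lists length := by
  have hA : (PySem.List.enumerate lists 0).foldl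
      (fun st p => pvStepA st (p.1, pvKey length p.2)) (0, 0, PySem.Dict.empty)
      = (pvM (lists.map (fun ele => pvKey length ele)),
         pvL (lists.map (fun ele => pvKey length ele)),
         PySem.Dict.counter (lists.map (fun ele => pvKey length ele))) := by
    rw [← pvA_inv, pv_enum_map, List.foldl_map]
  simp only [get_max_times_of_elements, get_max_times_of_elements_alt, hA,
    PySem.Dict.foldl_insert_getD_add_one_eq_counter, pvB_max, PySem.Dict.getD_counter]
  rfl

-- ===== VERDICT (by name: the statement is the Claim_ definition above) =====
theorem get_max_times_of_elements_spec : Claim_equal_get_max_times_of_elements := by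
  intro lists length _
  exact pv_main lists length
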